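-- pv_equiv track=rewrite | github.com/aarithi123/COP4533_Programming_Assignment_2 | src/cache_eviction_policy.py | count_misses_optff
-- ===== SOURCE A (Python) =====
-- from collections import deque, defaultdict, OrderedDict
--
-- def build_future_positions(requests):
--     future = defaultdict(deque)
--     for idx, item in enumerate(requests):
--         future[item].append(idx)
--     return future
--
-- def count_misses_optff(k, requests):
--     future = build_future_positions(requests)
--
--     cache_items = set()
--     misses = 0
--
--     for idx, item in enumerate(requests):
--         # We are using this occurrence now, so remove it from future[item]
--         future[item].popleft()
--
--         if item in cache_items:
--             # hit
--             continue
--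
--         # miss
--         misses += 1
--
--         if len(cache_items) < k:
--             cache_items.add(item)
--         else:
--             # choose victim: farthest next use (or never used again)
--             victim = None
--             victim_next = -1  # bigger means "farther in future"
--
--             for cached_item in cache_items:
--                 if len(future[cached_item]) == 0:
--                     next_use = float("inf")  # never again
--                 else:
--                     next_use = future[cached_item][0]  # next index it appears
--
--                 if victim is None or next_use > victim_next:
--                     victim = cached_item
--                     victim_next = next_use
--
--             cache_items.remove(victim)
--             cache_items.add(item)
--
--     return misses
-- ===== SOURCE B (Python) =====
-- def count_misses_optff(k, requests):
--     n = len(requests)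
--     # nxt[i] = index of the next occurrence of requests[i] after i, or n if none
--     nxt = [0] * n
--     last = {}
--     for i in range(n - 1, -1, -1):
--         nxt[i] = last.get(requests[i], n)
--         last[requests[i]] = i
--     # Identity-free cache: the cache is represented only by the next-use
--     # positions of its items -- 'uses' (ascending) for items that recur,
--     # 'dead' counts items never requested again.  A request is a hit iff its
--     # index is the smallest pending next-use; Belady's victim is a dead item
--     # if any, else the largest pending next-use (the tail of 'uses').
--     uses = []
--     dead = 0
--     misses = 0
--     for i in range(n):
--         if uses and uses[0] == i:
--             uses.pop(0)              # hit: consume this pending next use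
--         else:
--             misses += 1
--             if dead + len(uses) >= k:
--                 if dead:
--                     dead -= 1        # evict an item never requested again
--                 else:
--                     uses.pop()       # evict the farthest next use
--         # the current item is now cached; record its own next use
--         if nxt[i] == n:
--             dead += 1
--         else:
--             j = 0
--             while j < len(uses) and uses[j] <= nxt[i]:
--                 j += 1
--             uses.insert(j, nxt[i])
--     return misses
-- ===== Notes on version B (the rewrite author's own statement) =====
-- stated objective: faster
-- what changed: B drops A's item-keyed cache set and future-deque dict entirely: after one backward pass computing next-occurrence indices, the cache is represented identity-free as an ascending list of pending next-use positions plus a count of never-again items, so a hit is an O(1) head comparison, evicting a never-again item is a counter decrement, and the Belady victim is popped from the tail instead of A's per-miss scan over all cached items.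
import Mathlib
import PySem

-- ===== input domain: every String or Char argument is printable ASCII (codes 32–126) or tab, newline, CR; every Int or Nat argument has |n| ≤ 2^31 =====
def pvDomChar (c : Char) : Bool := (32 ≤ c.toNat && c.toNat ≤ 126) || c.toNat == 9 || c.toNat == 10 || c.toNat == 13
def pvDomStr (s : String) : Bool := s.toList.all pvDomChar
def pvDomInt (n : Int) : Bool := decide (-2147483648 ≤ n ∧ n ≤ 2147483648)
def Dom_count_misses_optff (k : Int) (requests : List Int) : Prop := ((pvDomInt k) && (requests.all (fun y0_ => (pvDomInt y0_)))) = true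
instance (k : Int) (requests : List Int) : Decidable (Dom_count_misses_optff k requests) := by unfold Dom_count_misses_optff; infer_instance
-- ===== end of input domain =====

-- B replaces A's item-keyed cache set + dict of future deques (with a per-miss scan over the
-- cached items) by an identity-free cache: an ascending list of pending next-use positions plus a
-- count of never-again items — O(1) hit test and eviction (objective: faster, measured by the
-- timing run; equal return values proved below).
-- Python A iterates over a hash set to pick the victim; the returned miss COUNT does not depend on
-- that iteration order (ties occur only between never-used-again items), and the port iterates in
-- insertion order.

-- ===== PORT A =====
def build_future_positions (requests : List Int) : PySem.Dict Int (List Int) :=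
  (PySem.List.enumerate requests 0).foldl
    (fun future p => future.insert p.2 (future.getD p.2 [] ++ [p.1]))
    PySem.Dict.empty

-- Python's next_use is an int or float('inf'); modelled as Option Int with none = inf.
def pyInfGt : Option Int → Option Int → Bool
  | none, none => false
  | none, some _ => true
  | some _, none => false
  | some x, some y => decide (x > y)

def nextUseOf (future : PySem.Dict Int (List Int)) (y : Int) : Option Int :=
  match future.getD y [] with
  | [] => none
  | j :: _ => some j

-- the inner 'for cached_item in cache_items' loop of A
def selectVictim (future : PySem.Dict Int (List Int)) (cacheItems : PySem.Set Int) :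
    Option Int × Option Int :=
  cacheItems.foldl
    (fun vp c =>
      if vp.1 = none ∨ pyInfGt (nextUseOf future c) vp.2 = true
      then (some c, nextUseOf future c) else vp)
    (none, some (-1))

def stepA (k : Int) (st : PySem.Dict Int (List Int) × PySem.Set Int × Int) (p : Int × Int) :
    PySem.Dict Int (List Int) × PySem.Set Int × Int :=
  -- future[item].popleft(): drop the head (the deque is never empty on reachable states)
  let future := st.1.insert p.2 ((st.1.getD p.2 []).drop 1)
  if PySem.Set.contains st.2.1 p.2 then (future, st.2.1, st.2.2)
  else
    if PySem.Set.len st.2.1 < k then (future, PySem.Set.add st.2.1 p.2, st.2.2 + 1)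
    else
      match (selectVictim future st.2.1).1 with
      | some v => (future, PySem.Set.add (PySem.Set.discard st.2.1 v) p.2, st.2.2 + 1)
      | none => (future, st.2.1, st.2.2 + 1)  -- Python raises KeyError here (cache empty, k ≤ 0); outside Pre_

def count_misses_optff (k : Int) (requests : List Int) : Int :=
  ((PySem.List.enumerate requests 0).foldl (stepA k)
    (build_future_positions requests, PySem.Set.empty, 0)).2.2

-- ===== PORT B =====
-- nxt[i] = index of the next occurrence of requests[i] after i, or len(requests) if none
def buildNxt (requests : List Int) : List Int :=
  ((PySem.List.pyRange ((requests.length : Int) - 1) (-1) (-1)).foldl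
    (fun (s : List Int × PySem.Dict Int Int) i =>
      (s.1.set i.toNat (s.2.getD (PySem.List.pyGetD requests i 0) (requests.length : Int)),
       s.2.insert (PySem.List.pyGetD requests i 0) i))
    (List.replicate requests.length 0, PySem.Dict.empty)).1

-- the hand-written 'while j < len(uses) and uses[j] <= v: j += 1' scan of Source B
def insortPos : List Int → Int → Nat
  | [], _ => 0
  | x :: t, v => if x ≤ v then insortPos t v + 1 else 0

-- state: (uses, dead, misses); Source B's loop runs over i in range(n)
def stepB (k n : Int) (nxt : List Int) :
    List Int × Int × Int → Int → List Int × Int × Int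
  | (uses, dead, m), i =>
    let st1 : List Int × Int × Int :=
      if uses.head? = some i then (uses.drop 1, dead, m)   -- 'uses and uses[0] == i'; uses.pop(0)
      else
        if k ≤ dead + (uses.length : Int) then
          if dead ≠ 0 then (uses, dead - 1, m + 1)
          else (uses.dropLast, dead, m + 1)  -- uses.pop(); Python raises IndexError on [] (k ≤ 0); outside Pre_
        else (uses, dead, m + 1)
    let v := PySem.List.pyGetD nxt i 0
    if v = n then (st1.1, st1.2.1 + 1, st1.2.2)
    else (st1.1.insertIdx (insortPos st1.1 v) v, st1.2.1, st1.2.2)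

def count_misses_optff_alt (k : Int) (requests : List Int) : Int :=
  ((PySem.List.pyRange 0 (requests.length : Int) 1).foldl
    (stepB k (requests.length : Int) (buildNxt requests))
    ([], 0, 0)).2.2

-- ===== PRECONDITION & SPEC =====
-- Pre_ excludes exactly the inputs on which Python A raises KeyError: k ≤ 0 with a nonempty request list.
def Pre_count_misses_optff (k : Int) (requests : List Int) : Prop :=
  requests = [] ∨ 1 ≤ k
instance (k : Int) (requests : List Int) : Decidable (Pre_count_misses_optff k requests) := by
  unfold Pre_count_misses_optff; infer_instance

def pvWitness_count_misses_optff : Int × List Int := (2, [1, 2, 3, 1, 2, 4])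

def Spec_count_misses_optff (k : Int) (requests : List Int) (out : Int) : Prop :=
  out = count_misses_optff_alt k requests
instance (k : Int) (requests : List Int) (out : Int) : Decidable (Spec_count_misses_optff k requests out) := by
  unfold Spec_count_misses_optff; infer_instance

-- ===== CLAIM (what is proved, stated in full; the proofs are below) =====
def Claim_equal_count_misses_optff : Prop := ∀ (k : Int) (requests : List Int), Dom_count_misses_optff k requests → Pre_count_misses_optff k requests → Spec_count_misses_optff k requests (count_misses_optff k requests)

-- ===== LEMMAS AND PROOFS =====

-- occAux suf s y : the (increasing) positions of y in suf, where suf starts at absolute position s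
def occAux : List Int → Int → Int → List Int
  | [], _, _ => []
  | x :: t, s, y => if x = y then s :: occAux t (s + 1) y else occAux t (s + 1) y

lemma occAux_mem_bound {t : List Int} {s y j : Int} (h : j ∈ occAux t s y) :
    s ≤ j ∧ j < s + t.length := by
  induction t generalizing s with
  | nil => simp [occAux] at h
  | cons x r ih =>
    simp only [occAux] at h
    split_ifs at h with hx
    · rcases List.mem_cons.mp h with rfl | h
      · simp only [List.length_cons]; push_cast; omega
      · have := ih h; simp only [List.length_cons] at this ⊢; push_cast at this ⊢; omega
    · have := ih h; simp only [List.length_cons] at this ⊢; push_cast at this ⊢; omega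

lemma occAux_ne (x : Int) {t : List Int} {s y : Int} (h : x ≠ y) :
    occAux (x :: t) s y = occAux t (s + 1) y := by simp [occAux, h]

lemma occAux_self (x : Int) (t : List Int) (s : Int) :
    occAux (x :: t) s x = s :: occAux t (s + 1) x := by simp [occAux]

lemma build_future_getD (l : List Int) (s : Int) (d : PySem.Dict Int (List Int)) (y : Int) :
    ((PySem.List.enumerate l s).foldl
      (fun future p => future.insert p.2 (future.getD p.2 [] ++ [p.1])) d).getD y []
      = d.getD y [] ++ occAux l s y := by
  induction l generalizing s d with
  | nil => simp [PySem.List.enumerate_nil, occAux]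
  | cons x t ih =>
    rw [PySem.List.enumerate_cons]
    simp only [List.foldl_cons]
    rw [ih]
    by_cases hxy : x = y
    · subst hxy
      rw [PySem.Dict.getD_insert_self]
      simp [occAux]
    · rw [PySem.Dict.getD_insert_of_ne (hne := Ne.symm hxy)]
      simp [occAux, hxy]

lemma nxtAux (l : List Int) (u : Nat) (cur : List Int) (last : PySem.Dict Int Int)
    (hu : u ≤ l.length) (hlen : cur.length = l.length)
    (hlast : ∀ x, last.getD x (l.length : Int)
      = ((occAux (l.drop u) (u : Int) x).head?).getD (l.length : Int))
    (hcur : ∀ j : Nat, u ≤ j → (hj : j < l.length) →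
      cur[j]? = some (((occAux (l.drop (j + 1)) ((j : Int) + 1) (l[j])).head?).getD (l.length : Int))) :
    ∀ j : Nat, (hj : j < l.length) →
      ((PySem.List.pyRange ((u : Int) - 1) (-1) (-1)).foldl
        (fun (s : List Int × PySem.Dict Int Int) i =>
          (s.1.set i.toNat (s.2.getD (PySem.List.pyGetD l i 0) (l.length : Int)),
           s.2.insert (PySem.List.pyGetD l i 0) i))
        (cur, last)).1[j]?
      = some (((occAux (l.drop (j + 1)) ((j : Int) + 1) (l[j])).head?).getD (l.length : Int)) := by
  induction u generalizing cur last with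
  | zero =>
    rw [PySem.List.pyRange_neg_one_eq_nil (by omega)]
    intro j hj
    exact hcur j (Nat.zero_le j) hj
  | succ u ih =>
    have hrange : PySem.List.pyRange ((u + 1 : Nat) - 1 : Int) (-1) (-1)
        = ((u : Nat) : Int) :: PySem.List.pyRange ((u : Int) - 1) (-1) (-1) := by
      rw [show ((u + 1 : Nat) - 1 : Int) = ((u : Nat) : Int) by push_cast; ring]
      exact PySem.List.pyRange_neg_one_cons (by omega)
    rw [hrange, List.foldl_cons]
    have hul : u < l.length := by omega
    have hx : PySem.List.pyGetD l ((u : Nat) : Int) 0 = l[u] := by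
      rw [PySem.List.pyGetD_natCast]
      simp [List.getD, hul]
    have hdrop : l.drop u = l[u] :: l.drop (u + 1) := List.drop_eq_getElem_cons hul
    apply ih
    · omega
    · simpa using hlen
    · intro x
      rw [hx]
      by_cases hxy : l[u] = x
      · subst hxy
        rw [PySem.Dict.getD_insert_self]
        rw [hdrop]
        simp [occAux]
      · rw [PySem.Dict.getD_insert_of_ne (hne := Ne.symm hxy)]
        rw [hlast x, hdrop]
        rw [show occAux (l[u] :: l.drop (u + 1)) (u : Int) x
            = occAux (l.drop (u + 1)) ((u : Int) + 1) x by simp [occAux, hxy]]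
        rw [Nat.cast_add, Nat.cast_one]
    · intro j huj hj
      rw [hx]
      simp only [Int.toNat_natCast]
      by_cases hju : j = u
      · subst hju
        rw [List.getElem?_set_self (by omega)]
        rw [hlast l[j]]
        rw [Nat.cast_add, Nat.cast_one]
      · rw [List.getElem?_set_ne (by omega)]
        exact hcur j (by omega) hj

lemma buildNxt_spec (l : List Int) (j : Nat) (hj : j < l.length) :
    (buildNxt l)[j]? = some (((occAux (l.drop (j + 1)) ((j : Int) + 1) (l[j])).head?).getD (l.length : Int)) := by
  have := nxtAux l l.length (List.replicate l.length 0) PySem.Dict.empty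
    (le_refl _) (by simp)
    (by intro x; simp [occAux, PySem.Dict.getD, PySem.Dict.get?, PySem.Dict.empty])
    (by intro j h1 h2; omega)
    j hj
  simpa [buildNxt] using this

lemma pyInfGt_eq_getD {a b : Option Int} {N : Int}
    (ha : ∀ j, a = some j → j < N) (hb : ∀ j, b = some j → j < N) :
    pyInfGt a b = decide (b.getD N < a.getD N) := by
  cases a with
  | none => cases b with
    | none => simp [pyInfGt]
    | some x => have := hb x rfl; simp [pyInfGt]; omega
  | some x => cases b with
    | none => have := ha x rfl; simp [pyInfGt]; omega
    | some y => simp [pyInfGt, gt_iff_lt]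

lemma selectVictim_aux (future : PySem.Dict Int (List Int)) (L : List Int) (N : Int) (m : Int)
    (hb : ∀ y ∈ L, ∀ j, nextUseOf future y = some j → j < N)
    (hm : ∀ j, nextUseOf future m = some j → j < N) :
    L.foldl
      (fun vp c =>
        if vp.1 = none ∨ pyInfGt (nextUseOf future c) vp.2 = true
        then (some c, nextUseOf future c) else vp)
      (some m, nextUseOf future m)
    = (match L.foldl
        (fun acc x =>
          match acc with
          | none => some x
          | some mm => if (nextUseOf future mm).getD N < (nextUseOf future x).getD N then some x else some mm)
        (some m) with
       | some M => (some M, nextUseOf future M)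
       | none => (none, some (-1))) := by
  induction L generalizing m with
  | nil => simp
  | cons x t ih =>
    simp only [List.foldl_cons]
    rw [pyInfGt_eq_getD (hb x (by simp) ) hm]
    by_cases h : (nextUseOf future m).getD N < (nextUseOf future x).getD N
    · simp only [h, decide_true, or_true, if_true]
      exact ih x (fun y hy => hb y (by simp [hy])) (hb x (by simp))
    · simp only [h, decide_false, or_false, reduceCtorEq, if_false]
      exact ih m (fun y hy => hb y (by simp [hy])) hm

lemma selectVictim_eq_max (future : PySem.Dict Int (List Int)) (S : List Int) (N : Int)
    (hb : ∀ y ∈ S, ∀ j, nextUseOf future y = some j → j < N) :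
    (selectVictim future S).1
      = PySem.List.max? S (fun y => (nextUseOf future y).getD N) := by
  cases S with
  | nil => simp [selectVictim, PySem.List.max?]
  | cons x t =>
    unfold selectVictim PySem.List.max?
    simp only [List.foldl_cons]
    rw [if_pos (by simp)]
    rw [selectVictim_aux future t N x (fun y hy => hb y (by simp [hy])) (hb x (by simp))]
    have hmm : ∀ (o : Option Int),
        (match o with
         | some M => (some M, nextUseOf future M)
         | none => ((none : Option Int), some (-1))).1 = o := by
      intro o; cases o <;> rfl
    rw [hmm]
    congr 1
    funext acc z
    cases acc <;> rfl

-- ---- generic helper lemmas for the profile (B-side) invariant ----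

lemma filter_isNone_add_filterMap_length (S : List Int) (f : Int → Option Int) :
    (S.filter (fun y => (f y).isNone)).length + (S.filterMap f).length = S.length := by
  induction S with
  | nil => simp
  | cons a S ih =>
    cases hfa : f a <;> simp [hfa, ← ih] <;> omega

lemma filterMap_perm_cons_erase {S : List Int} {f : Int → Option Int} {x a : Int}
    (hx : x ∈ S) (hfx : f x = some a) :
    (S.filterMap f).Perm (a :: (S.erase x).filterMap f) := by
  have h := List.Perm.filterMap f (List.perm_cons_erase hx)
  simpa [List.filterMap_cons, hfx] using h

lemma filterMap_perm_erase_of_none {S : List Int} {f : Int → Option Int} {x : Int}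
    (hx : x ∈ S) (hfx : f x = none) :
    (S.filterMap f).Perm ((S.erase x).filterMap f) := by
  have h := List.Perm.filterMap f (List.perm_cons_erase hx)
  simpa [List.filterMap_cons, hfx] using h

lemma filter_length_perm_cons_erase {S : List Int} {p : Int → Bool} {x : Int}
    (hx : x ∈ S) :
    (S.filter p).length = (if p x then 1 else 0) + ((S.erase x).filter p).length := by
  have h := (List.Perm.filter p (List.perm_cons_erase hx)).length_eq
  rw [h]
  by_cases hpx : p x <;> simp [hpx] <;> omega

lemma insertIdx_insortPos_perm (l : List Int) (v : Int) :
    (l.insertIdx (insortPos l v) v).Perm (v :: l) := by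
  induction l with
  | nil => simp [insortPos]
  | cons x t ih =>
    by_cases h : x ≤ v
    · simp only [insortPos, h, if_true, List.insertIdx_succ_cons]
      exact (ih.cons x).trans (List.Perm.swap v x t)
    · simp [insortPos, h, List.insertIdx]

lemma insertIdx_insortPos_sorted {l : List Int} (v : Int) (hs : l.Pairwise (· ≤ ·)) :
    (l.insertIdx (insortPos l v) v).Pairwise (· ≤ ·) := by
  induction l with
  | nil => simp [insortPos]
  | cons x t ih =>
    rw [List.pairwise_cons] at hs
    by_cases h : x ≤ v
    · simp only [insortPos, h, if_true, List.insertIdx_succ_cons]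
      rw [List.pairwise_cons]
      refine ⟨?_, ih hs.2⟩
      intro b hb
      have := (insertIdx_insortPos_perm t v).mem_iff.mp hb
      rcases List.mem_cons.mp this with rfl | hbt
      · exact h
      · exact hs.1 b hbt
    · simp only [insortPos, h, if_false]
      show List.Pairwise (· ≤ ·) (v :: x :: t)
      rw [List.pairwise_cons]
      refine ⟨?_, List.pairwise_cons.mpr hs⟩
      intro b hb
      rcases List.mem_cons.mp hb with rfl | hbt
      · omega
      · have := hs.1 b hbt; omega

lemma sorted_head_eq_of_mem_min {l : List Int} {s : Int} (hs : l.Pairwise (· ≤ ·))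
    (hmem : s ∈ l) (hlb : ∀ j ∈ l, s ≤ j) : l.head? = some s := by
  cases l with
  | nil => simp at hmem
  | cons x t =>
    rw [List.pairwise_cons] at hs
    rcases List.mem_cons.mp hmem with rfl | hst
    · rfl
    · have h1 := hs.1 s hst
      have h2 := hlb x (by simp)
      simp only [List.head?_cons, Option.some.injEq]
      omega

lemma sorted_getLast_max {l : List Int} (hs : l.Pairwise (· ≤ ·)) (h : l ≠ []) :
    ∀ j ∈ l, j ≤ l.getLast h := by
  induction l with
  | nil => simp at h
  | cons x t ih =>
    rw [List.pairwise_cons] at hs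
    intro j hj
    by_cases ht : t = []
    · subst ht
      simp at hj
      simp [hj, List.getLast]
    · rw [List.getLast_cons ht]
      rcases List.mem_cons.mp hj with rfl | hjt
      · exact hs.1 _ (List.getLast_mem ht)
      · exact ih hs.2 ht j hjt

-- ===== the main simulation =====

-- the "next use" of item y in the suffix u starting at absolute position s (none = never again)
def gfun (u : List Int) (s : Int) : Int → Option Int := fun y => (occAux u s y).head?

lemma main_sim (u : List Int) (s k N m : Int) (nxt : List Int)
    (future : PySem.Dict Int (List Int)) (S : PySem.Set Int)
    (uses : List Int) (dead : Int)
    (hk : 1 ≤ k)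
    (hN : s + u.length = N)
    (hf : ∀ y, future.getD y [] = occAux u s y)
    (hnd : S.Nodup)
    (hperm : uses.Perm (S.filterMap (gfun u s)))
    (hsort : uses.Pairwise (· ≤ ·))
    (hdead : dead = ((S.filter (fun y => (gfun u s y).isNone)).length : Int))
    (hnxt : ∀ d : Nat, d < u.length →
      PySem.List.pyGetD nxt (s + d) 0
        = ((occAux (u.drop (d + 1)) (s + d + 1) (u.getD d 0)).head?).getD N) :
    ((PySem.List.enumerate u s).foldl (stepA k) (future, S, m)).2.2
      = ((PySem.List.enumerate u s).foldl (fun st p => stepB k N nxt st p.1) (uses, dead, m)).2.2 := by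
  induction u generalizing s m future S uses dead with
  | nil => simp [PySem.List.enumerate_nil]
  | cons x t ih =>
    rw [PySem.List.enumerate_cons]
    simp only [List.foldl_cons]
    have hN' : (s + 1) + (t.length : Int) = N := by
      simp only [List.length_cons] at hN; push_cast at hN ⊢; omega
    have hf' : ∀ y, (future.insert x ((future.getD x []).drop 1)).getD y []
        = occAux t (s + 1) y := by
      intro y
      by_cases hxy : x = y
      · subst hxy; rw [PySem.Dict.getD_insert_self, hf, occAux_self]; rfl
      · rw [PySem.Dict.getD_insert_of_ne (hne := Ne.symm hxy), hf, occAux_ne _ hxy]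
    have hnu : ∀ y, nextUseOf (future.insert x ((future.getD x []).drop 1)) y
        = gfun t (s + 1) y := by
      intro y
      show nextUseOf _ y = (occAux t (s + 1) y).head?
      unfold nextUseOf
      rw [hf' y]
      cases occAux t (s + 1) y <;> rfl
    have hgx : gfun (x :: t) s x = some s := by
      show (occAux (x :: t) s x).head? = some s
      rw [occAux_self]
      rfl
    have hgne : ∀ y, y ≠ x → gfun (x :: t) s y = gfun t (s + 1) y := by
      intro y hy
      show (occAux (x :: t) s y).head? = (occAux t (s + 1) y).head?
      rw [occAux_ne x (Ne.symm hy)]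
    have hb' : ∀ y j, gfun t (s + 1) y = some j → s + 1 ≤ j ∧ j < N := by
      intro y j hj
      have hjm : j ∈ occAux t (s + 1) y :=
        List.mem_of_mem_head? (show (occAux t (s + 1) y).head? = some j from hj)
      have := occAux_mem_bound hjm
      omega
    have hbg : ∀ y j, gfun (x :: t) s y = some j → s ≤ j ∧ j < N := by
      intro y j hj
      have hjm : j ∈ occAux (x :: t) s y :=
        List.mem_of_mem_head? (show (occAux (x :: t) s y).head? = some j from hj)
      have := occAux_mem_bound hjm
      simp only [List.length_cons] at this
      push_cast at this
      omega
    have hv : PySem.List.pyGetD nxt s 0 = (gfun t (s + 1) x).getD N := by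
      show PySem.List.pyGetD nxt s 0 = ((occAux t (s + 1) x).head?).getD N
      have h0 := hnxt 0 (by simp)
      simpa using h0
    have husesB : ∀ j ∈ uses, s ≤ j ∧ j < N := by
      intro j hj
      have hjm : j ∈ S.filterMap (gfun (x :: t) s) := hperm.mem_iff.mp hj
      obtain ⟨y, _, hgy⟩ := List.mem_filterMap.mp hjm
      exact hbg y j hgy
    have hnxt' : ∀ d : Nat, d < t.length →
        PySem.List.pyGetD nxt ((s + 1) + d) 0
          = ((occAux (t.drop (d + 1)) ((s + 1) + d + 1) (t.getD d 0)).head?).getD N := by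
      intro d hd
      have h1 := hnxt (d + 1) (by simp only [List.length_cons]; omega)
      rw [show (s + ((d + 1 : Nat) : Int)) = (s + 1) + (d : Nat) by push_cast; ring] at h1
      simpa using h1
    have hcongr_erase : ∀ (L : List Int), x ∉ L →
        L.filterMap (gfun (x :: t) s) = L.filterMap (gfun t (s + 1)) :=
      fun L hL => List.filterMap_congr (fun y hy => hgne y (fun he => hL (he ▸ hy)))
    have hcongr_filter : ∀ (L : List Int), x ∉ L →
        L.filter (fun y => (gfun (x :: t) s y).isNone)
          = L.filter (fun y => (gfun t (s + 1) y).isNone) :=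
      fun L hL => List.filter_congr (fun y hy => by rw [hgne y (fun he => hL (he ▸ hy))])
    by_cases hmem : x ∈ S
    · -- HIT
      have hs_mem_uses : s ∈ uses :=
        hperm.mem_iff.mpr (List.mem_filterMap.mpr ⟨x, hmem, hgx⟩)
      have hheadB : uses.head? = some s :=
        sorted_head_eq_of_mem_min hsort hs_mem_uses (fun j hj => (husesB j hj).1)
      have hA : PySem.Set.contains S x = true := by
        simpa [PySem.Set.contains] using hmem
      rw [show stepA k (future, S, m) (s, x)
          = (future.insert x ((future.getD x []).drop 1), S, m) by
        simp only [stepA]; rw [hA, if_pos rfl]]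
      have hx_notin_erase : x ∉ S.erase x := fun h =>
        ((List.Nodup.mem_erase_iff hnd).mp h).1 rfl
      have htail_perm : (uses.drop 1).Perm ((S.erase x).filterMap (gfun t (s + 1))) := by
        have h1 : (S.filterMap (gfun (x :: t) s)).Perm
            (s :: (S.erase x).filterMap (gfun (x :: t) s)) :=
          filterMap_perm_cons_erase hmem hgx
        have h2 : uses = s :: uses.drop 1 := by
          rw [List.drop_one]; exact (List.cons_head?_tail hheadB).symm
        have h3 : (s :: uses.drop 1).Perm
            (s :: (S.erase x).filterMap (gfun (x :: t) s)) :=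
          h2 ▸ hperm.trans h1
        rw [hcongr_erase _ hx_notin_erase] at h3
        exact h3.cons_inv
      have htail_sorted : (uses.drop 1).Pairwise (· ≤ ·) := by
        rw [List.drop_one]
        exact hsort.sublist (List.tail_sublist uses)
      have hdead_split : ((S.filter (fun y => (gfun (x :: t) s y).isNone)).length : Int)
          = (((S.erase x).filter (fun y => (gfun t (s + 1) y).isNone)).length : Int) := by
        rw [filter_length_perm_cons_erase (p := fun y => (gfun (x :: t) s y).isNone) hmem]
        rw [hgx]
        simp only [Option.isNone_some, Bool.false_eq_true, if_false]
        rw [hcongr_filter _ hx_notin_erase]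
        push_cast
        ring
      have hdead_new : ((S.filter (fun y => (gfun t (s + 1) y).isNone)).length : Int)
          = dead + (if (gfun t (s + 1) x).isNone then 1 else 0) := by
        rw [filter_length_perm_cons_erase (p := fun y => (gfun t (s + 1) y).isNone) hmem]
        rw [hdead, hdead_split]
        by_cases hgx' : (gfun t (s + 1) x).isNone <;> simp [hgx'] <;> omega
      cases hx' : gfun t (s + 1) x with
      | some j =>
        have hjN : j < N := (hb' x j hx').2
        rw [show stepB k N nxt (uses, dead, m) s
            = ((uses.drop 1).insertIdx (insortPos (uses.drop 1) j) j, dead, m) by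
          simp only [stepB]
          rw [hheadB, if_pos rfl, hv, hx']
          simp only [Option.getD_some]
          rw [if_neg (show ¬ (j = N) by omega)]]
        apply ih (s + 1) m _ _ _ _ hN' hf' hnd
        · have h4 : (S.filterMap (gfun t (s + 1))).Perm
              (j :: (S.erase x).filterMap (gfun t (s + 1))) :=
            filterMap_perm_cons_erase hmem hx'
          exact ((insertIdx_insortPos_perm (uses.drop 1) j).trans
            (htail_perm.cons j)).trans h4.symm
        · exact insertIdx_insortPos_sorted j htail_sorted
        · rw [hdead_new, hx']; simp
        · exact hnxt'
      | none =>
        rw [show stepB k N nxt (uses, dead, m) s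
            = (uses.drop 1, dead + 1, m) by
          simp only [stepB]
          rw [hheadB, if_pos rfl, hv, hx']
          simp]
        apply ih (s + 1) m _ _ _ _ hN' hf' hnd
        · have h4 : (S.filterMap (gfun t (s + 1))).Perm
              ((S.erase x).filterMap (gfun t (s + 1))) :=
            filterMap_perm_erase_of_none hmem hx'
          exact htail_perm.trans h4.symm
        · exact htail_sorted
        · rw [hdead_new, hx']; simp
        · exact hnxt'
    · -- MISS
      have hA : PySem.Set.contains S x = false := by
        simp [PySem.Set.contains]; exact hmem
      have hheadB : uses.head? ≠ some s := by
        intro h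
        have hs_mem : s ∈ uses := List.mem_of_mem_head? h
        have hmemf : s ∈ S.filterMap (gfun (x :: t) s) := hperm.mem_iff.mp hs_mem
        obtain ⟨y, hy, hgy⟩ := List.mem_filterMap.mp hmemf
        by_cases hyx : y = x
        · exact hmem (hyx ▸ hy)
        · have := hb' y s (hgne y hyx ▸ hgy)
          omega
      have hsize : (S.length : Int) = dead + uses.length := by
        have hcount := filter_isNone_add_filterMap_length S (gfun (x :: t) s)
        have hlen := hperm.length_eq
        rw [hdead]
        omega
      have hfy : ∀ y ∈ S, nextUseOf (future.insert x ((future.getD x []).drop 1)) y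
          = gfun (x :: t) s y := by
        intro y hy
        rw [hnu y, hgne y (fun he => hmem (he ▸ hy))]
      by_cases hroom : ((S.length : Nat) : Int) < k
      · -- room in the cache
        rw [show stepA k (future, S, m) (s, x)
            = (future.insert x ((future.getD x []).drop 1), S ++ [x], m + 1) by
          simp only [stepA, PySem.Set.len, PySem.Set.add]
          rw [hA, if_neg Bool.false_ne_true, if_pos hroom, if_neg Bool.false_ne_true]]
        have hnd' : (S ++ [x]).Nodup := by
          have := PySem.Set.nodup_add S x hnd
          rwa [PySem.Set.add_of_not_mem hmem] at this
        have hdead_app : ∀ (c : Int),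
            (if (gfun t (s + 1) x).isNone then (1 : Int) else 0) = c →
            (((S ++ [x]).filter (fun y => (gfun t (s + 1) y).isNone)).length : Int)
              = dead + c := by
          intro c hc
          rw [List.filter_append, ← hcongr_filter S hmem]
          subst hc
          by_cases hgx' : (gfun t (s + 1) x).isNone <;> simp [hgx', hdead]
        cases hx' : gfun t (s + 1) x with
        | some j =>
          rw [show stepB k N nxt (uses, dead, m) s
              = (uses.insertIdx (insortPos uses j) j, dead, m + 1) by
            simp only [stepB]
            rw [if_neg hheadB,
              if_neg (show ¬ k ≤ dead + (uses.length : Int) by omega), hv, hx']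
            simp only [Option.getD_some]
            rw [if_neg (show ¬ (j = N) by have := (hb' x j hx').2; omega)]]
          apply ih (s + 1) (m + 1) _ _ _ _ hN' hf' hnd'
          · rw [show (S ++ [x]).filterMap (gfun t (s + 1))
                = S.filterMap (gfun (x :: t) s) ++ [j] by
              rw [List.filterMap_append, hcongr_erase S hmem]
              simp [hx']]
            exact (insertIdx_insortPos_perm uses j).trans
              ((hperm.cons j).trans (List.perm_append_singleton j _).symm)
          · exact insertIdx_insortPos_sorted j hsort
          · rw [hdead_app 0 (by simp [hx'])]; ring
          · exact hnxt'
        | none =>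
          rw [show stepB k N nxt (uses, dead, m) s
              = (uses, dead + 1, m + 1) by
            simp only [stepB]
            rw [if_neg hheadB,
              if_neg (show ¬ k ≤ dead + (uses.length : Int) by omega), hv, hx']
            simp]
          apply ih (s + 1) (m + 1) _ _ _ _ hN' hf' hnd'
          · rw [show (S ++ [x]).filterMap (gfun t (s + 1))
                = S.filterMap (gfun (x :: t) s) by
              rw [List.filterMap_append, hcongr_erase S hmem]
              simp [hx']]
            exact hperm
          · exact hsort
          · rw [hdead_app 1 (by simp [hx'])]
          · exact hnxt'
      · -- eviction
        have hSne : S ≠ [] := by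
          intro h
          subst h
          simp at hroom
          omega
        have hbound_sel : ∀ y ∈ S, ∀ j,
            nextUseOf (future.insert x ((future.getD x []).drop 1)) y = some j → j < N := by
          intro y hy j hj
          rw [hfy y hy] at hj
          exact (hbg y j hj).2
        obtain ⟨v, hV⟩ : ∃ v, PySem.List.max? S
            (fun y => (nextUseOf (future.insert x ((future.getD x []).drop 1)) y).getD N)
            = some v := by
          cases hmx : PySem.List.max? S
              (fun y => (nextUseOf (future.insert x ((future.getD x []).drop 1)) y).getD N) with
          | none => exact absurd ((PySem.List.max?_eq_none_iff _ _).mp hmx) hSne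
          | some v => exact ⟨v, rfl⟩
        have hvmem : v ∈ S := PySem.List.max?_mem hV
        have hvmax := PySem.List.max?_isMax hV
        have hx_notin_disc : x ∉ PySem.Set.discard S v := by
          intro h
          exact hmem ((PySem.Set.mem_discard S v x).mp h).1
        rw [show stepA k (future, S, m) (s, x)
            = (future.insert x ((future.getD x []).drop 1),
               PySem.Set.discard S v ++ [x], m + 1) by
          simp only [stepA, PySem.Set.len]
          rw [hA, if_neg Bool.false_ne_true, if_neg hroom,
            selectVictim_eq_max _ S N hbound_sel, hV]
          simp only []
          rw [PySem.Set.add_of_not_mem hx_notin_disc]]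
        have hnd_disc : (PySem.Set.discard S v).Nodup := PySem.Set.nodup_discard S v hnd
        have hnd' : (PySem.Set.discard S v ++ [x]).Nodup := by
          have := PySem.Set.nodup_add _ x hnd_disc
          rwa [PySem.Set.add_of_not_mem hx_notin_disc] at this
        have hdisc_perm : (PySem.Set.discard S v).Perm (S.erase v) := by
          rw [List.perm_ext_iff_of_nodup hnd_disc (hnd.erase v)]
          intro a
          rw [PySem.Set.mem_discard, List.Nodup.mem_erase_iff hnd]
          tauto
        have hx_notin_erase_v : x ∉ S.erase v := fun h =>
          hmem (List.mem_of_mem_erase h)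
        have hfm_disc : ((PySem.Set.discard S v).filterMap (gfun t (s + 1))).Perm
            ((S.erase v).filterMap (gfun (x :: t) s)) := by
          rw [← hcongr_erase _ hx_notin_disc]
          exact (hdisc_perm.filterMap _)
        have hdead_disc : ∀ (c : Int),
            (if (gfun t (s + 1) x).isNone then (1 : Int) else 0) = c →
            (((PySem.Set.discard S v ++ [x]).filter
                (fun y => (gfun t (s + 1) y).isNone)).length : Int)
              = (((S.erase v).filter (fun y => (gfun (x :: t) s y).isNone)).length : Int) + c := by
          intro c hc
          rw [List.filter_append, List.length_append,
            ← hcongr_filter _ hx_notin_disc,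
            (hdisc_perm.filter (fun y => (gfun (x :: t) s y).isNone)).length_eq]
          subst hc
          by_cases hgx' : (gfun t (s + 1) x).isNone <;> simp [hgx']
        have hnotroom : k ≤ dead + (uses.length : Int) := by omega
        by_cases hdz : dead = 0
        · -- no never-again item cached: the victim carries the farthest next use
          have hall_some : ∀ y ∈ S, (gfun (x :: t) s y).isNone = false := by
            intro y hy
            by_contra hc
            have hyf : y ∈ S.filter (fun y => (gfun (x :: t) s y).isNone) := by
              rw [List.mem_filter]
              exact ⟨hy, by simpa using hc⟩
            have h0 : (S.filter (fun y => (gfun (x :: t) s y).isNone)).length = 0 := by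
              omega
            rw [List.length_eq_zero_iff] at h0
            rw [h0] at hyf
            simp at hyf
          have huses_ne : uses ≠ [] := by
            intro h
            rw [h] at hsize
            simp at hsize
            omega
          obtain ⟨a, ha⟩ : ∃ a, gfun (x :: t) s v = some a := by
            have hvs := hall_some v hvmem
            cases hgv : gfun (x :: t) s v with
            | none => rw [hgv] at hvs; simp at hvs
            | some a => exact ⟨a, rfl⟩
          have hL := List.dropLast_concat_getLast huses_ne
          have hLmax : ∀ j ∈ uses, j ≤ uses.getLast huses_ne :=
            sorted_getLast_max hsort huses_ne
          have haL : a = uses.getLast huses_ne := by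
            have ha_mem : a ∈ uses := hperm.mem_iff.mpr
              (List.mem_filterMap.mpr ⟨v, hvmem, ha⟩)
            have h1 : a ≤ uses.getLast huses_ne := hLmax a ha_mem
            have hL_mem : uses.getLast huses_ne ∈ uses := List.getLast_mem huses_ne
            have hfm : uses.getLast huses_ne ∈ S.filterMap (gfun (x :: t) s) :=
              hperm.mem_iff.mp hL_mem
            obtain ⟨y1, hy1, hgy1⟩ := List.mem_filterMap.mp hfm
            have h2 := hvmax y1 hy1
            rw [hfy y1 hy1, hfy v hvmem, ha, hgy1] at h2
            simp only [Option.getD_some] at h2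
            omega
          have hdrop_perm : (uses.dropLast).Perm ((S.erase v).filterMap (gfun (x :: t) s)) := by
            have h1 : (S.filterMap (gfun (x :: t) s)).Perm
                (a :: (S.erase v).filterMap (gfun (x :: t) s)) :=
              filterMap_perm_cons_erase hvmem ha
            have h2 : uses.Perm (a :: uses.dropLast) := by
              conv_lhs => rw [← hL, ← haL]
              exact (List.perm_append_singleton a _)
            exact (h2.symm.trans (hperm.trans h1)).cons_inv
          have hdrop_sorted : (uses.dropLast).Pairwise (· ≤ ·) :=
            hsort.sublist (List.dropLast_sublist uses)
          have hdead_erase :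
              (((S.erase v).filter (fun y => (gfun (x :: t) s y).isNone)).length : Int) = 0 := by
            have he : (S.erase v).filter (fun y => (gfun (x :: t) s y).isNone) = [] := by
              rw [List.filter_eq_nil_iff]
              intro y hy
              simp [hall_some y (List.mem_of_mem_erase hy)]
            rw [he]
            rfl
          cases hx' : gfun t (s + 1) x with
          | some j =>
            rw [show stepB k N nxt (uses, dead, m) s
                = ((uses.dropLast).insertIdx (insortPos uses.dropLast j) j, dead, m + 1) by
              simp only [stepB]
              rw [if_neg hheadB,
                if_pos (show k ≤ dead + (uses.length : Int) by omega),
                if_neg (show ¬ dead ≠ 0 by omega), hv, hx']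
              simp only [Option.getD_some]
              rw [if_neg (show ¬ (j = N) by have := (hb' x j hx').2; omega)]]
            apply ih (s + 1) (m + 1) _ _ _ _ hN' hf' hnd'
            · rw [List.filterMap_append,
                show List.filterMap (gfun t (s + 1)) [x] = [j] by simp [hx']]
              exact ((insertIdx_insortPos_perm uses.dropLast j).trans
                ((hdrop_perm.cons j).trans (List.perm_append_singleton j _).symm)).trans
                (List.Perm.append hfm_disc.symm (List.Perm.refl [j]))
            · exact insertIdx_insortPos_sorted j hdrop_sorted
            · rw [hdead_disc 0 (by simp [hx']), hdead_erase]; omega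
            · exact hnxt'
          | none =>
            rw [show stepB k N nxt (uses, dead, m) s
                = (uses.dropLast, dead + 1, m + 1) by
              simp only [stepB]
              rw [if_neg hheadB,
                if_pos (show k ≤ dead + (uses.length : Int) by omega),
                if_neg (show ¬ dead ≠ 0 by omega), hv, hx']
              simp]
            apply ih (s + 1) (m + 1) _ _ _ _ hN' hf' hnd'
            · rw [List.filterMap_append,
                show List.filterMap (gfun t (s + 1)) [x] = [] by simp [hx'],
                List.append_nil]
              exact hdrop_perm.trans hfm_disc.symm
            · exact hdrop_sorted
            · rw [hdead_disc 1 (by simp [hx']), hdead_erase]; omega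
            · exact hnxt'
        · -- a never-again item exists in the cache: it is the victim
          obtain ⟨y0, hy0, hgy0⟩ : ∃ y0 ∈ S, (gfun (x :: t) s y0).isNone = true := by
            have hlen_pos : (S.filter (fun y => (gfun (x :: t) s y).isNone)).length ≠ 0 := by
              intro h
              rw [hdead] at hdz
              simp [h] at hdz
            have hne : S.filter (fun y => (gfun (x :: t) s y).isNone) ≠ [] := by
              intro h2
              rw [h2] at hlen_pos
              simp at hlen_pos
            obtain ⟨y, hy⟩ := List.exists_mem_of_ne_nil _ hne
            exact ⟨y, (List.mem_filter.mp hy).1, (List.mem_filter.mp hy).2⟩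
          have hgy0' : gfun (x :: t) s y0 = none := by
            cases h : gfun (x :: t) s y0
            · rfl
            · rw [h] at hgy0; simp at hgy0
          have hgv_none : gfun (x :: t) s v = none := by
            have h2 := hvmax y0 hy0
            rw [hfy y0 hy0, hfy v hvmem, hgy0'] at h2
            simp only [Option.getD_none] at h2
            cases hgv : gfun (x :: t) s v with
            | none => rfl
            | some a =>
              rw [hgv] at h2
              simp only [Option.getD_some] at h2
              have := (hbg v a hgv).2
              omega
          have hperm_erase_v : (S.filterMap (gfun (x :: t) s)).Perm
              ((S.erase v).filterMap (gfun (x :: t) s)) :=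
            filterMap_perm_erase_of_none hvmem hgv_none
          have hdead_erase :
              (((S.erase v).filter (fun y => (gfun (x :: t) s y).isNone)).length : Int)
              = dead - 1 := by
            have h1 := filter_length_perm_cons_erase
              (p := fun y => (gfun (x :: t) s y).isNone) hvmem
            simp [hgv_none] at h1
            rw [hdead]
            omega
          cases hx' : gfun t (s + 1) x with
          | some j =>
            rw [show stepB k N nxt (uses, dead, m) s
                = (uses.insertIdx (insortPos uses j) j, dead - 1, m + 1) by
              simp only [stepB]
              rw [if_neg hheadB,
                if_pos (show k ≤ dead + (uses.length : Int) by omega),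
                if_pos hdz, hv, hx']
              simp only [Option.getD_some]
              rw [if_neg (show ¬ (j = N) by have := (hb' x j hx').2; omega)]]
            apply ih (s + 1) (m + 1) _ _ _ _ hN' hf' hnd'
            · rw [List.filterMap_append,
                show List.filterMap (gfun t (s + 1)) [x] = [j] by simp [hx']]
              exact ((insertIdx_insortPos_perm uses j).trans
                (((hperm.trans hperm_erase_v).cons j).trans
                  (List.perm_append_singleton j _).symm)).trans
                (List.Perm.append hfm_disc.symm (List.Perm.refl [j]))
            · exact insertIdx_insortPos_sorted j hsort
            · rw [hdead_disc 0 (by simp [hx']), hdead_erase]; omega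
            · exact hnxt'
          | none =>
            rw [show stepB k N nxt (uses, dead, m) s
                = (uses, dead - 1 + 1, m + 1) by
              simp only [stepB]
              rw [if_neg hheadB,
                if_pos (show k ≤ dead + (uses.length : Int) by omega),
                if_pos hdz, hv, hx', Option.getD_none, if_pos rfl]]
            apply ih (s + 1) (m + 1) _ _ _ _ hN' hf' hnd'
            · rw [List.filterMap_append,
                show List.filterMap (gfun t (s + 1)) [x] = [] by simp [hx'],
                List.append_nil]
              exact (hperm.trans hperm_erase_v).trans hfm_disc.symm
            · exact hsort
            · rw [hdead_disc 1 (by simp [hx']), hdead_erase]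
            · exact hnxt'

-- ===== VERDICT (by name: the statement is the Claim_ definition above) =====
theorem count_misses_optff_spec : Claim_equal_count_misses_optff := by
  intro k requests _ hpre
  unfold Spec_count_misses_optff count_misses_optff count_misses_optff_alt
  rcases hpre with hnil | hk
  · subst hnil; rfl
  · rw [show PySem.List.pyRange 0 (requests.length : Int) 1
        = (PySem.List.enumerate requests 0).map (·.1) by
      rw [PySem.List.map_fst_enumerate]; norm_num]
    rw [List.foldl_map]
    apply main_sim requests 0 k (requests.length : Int) 0 (buildNxt requests)
      (build_future_positions requests) PySem.Set.empty [] 0 hk (by ring)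
    · intro y
      have hb := build_future_getD requests 0 PySem.Dict.empty y
      simpa [build_future_positions, PySem.Dict.getD, PySem.Dict.get?, PySem.Dict.empty] using hb
    · exact List.nodup_nil
    · exact List.Perm.refl _
    · exact List.Pairwise.nil
    · simp
    · intro d hd
      have hspec := buildNxt_spec requests d hd
      rw [show ((0 : Int) + ((d : Nat) : Int)) = ((d : Nat) : Int) by ring, PySem.List.pyGetD_natCast]
      simp [List.getD, hspec, hd]
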